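-- pv_equiv track=rewrite | github.com/hexter2018/thai-alpr-system | backend/app/core/ocr_engine.py | _apply_ocr_corrections
-- ===== SOURCE A (Python) =====
-- def _apply_ocr_corrections(text: str) -> str:
--     """
--     Apply common OCR error corrections
--     Handle character confusion (e.g., 0 vs O, 1 vs I)
--     """
--     corrections = {
--         # Thai character corrections
--         'O': '0',  # O (letter) -> 0 (number)
--         'o': '0',
--         'I': '1',  # I (letter) -> 1 (number)
--         'l': '1',
--         'Z': '2',
--         'S': '5',
--         'B': '8',
--
--         # Remove common artifacts
--         '.': '',
--         ',': '',
--         ' ': '',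
--         '|': '1',
--     }
--
--     corrected = text
--     for wrong, correct in corrections.items():
--         corrected = corrected.replace(wrong, correct)
--
--     return corrected
-- ===== SOURCE B (Python) =====
-- def _apply_ocr_corrections(text: str) -> str:
--     """One pass over the characters: map each through the corrections table and join."""
--     corrections = {
--         'O': '0',
--         'o': '0',
--         'I': '1',
--         'l': '1',
--         'Z': '2',
--         'S': '5',
--         'B': '8',
--         '.': '',
--         ',': '',
--         ' ': '',
--         '|': '1',
--     }
--     pieces = []
--     for ch in text:
--         pieces.append(corrections.get(ch, ch))
--     return ''.join(pieces)
-- ===== Notes on version B (the rewrite author's own statement) =====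
-- stated objective: alternative
-- what changed: Replaces A's 11 sequential full-string str.replace passes with a single character-by-character pass that maps each character through the same corrections dict and joins the pieces.
import Mathlib
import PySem

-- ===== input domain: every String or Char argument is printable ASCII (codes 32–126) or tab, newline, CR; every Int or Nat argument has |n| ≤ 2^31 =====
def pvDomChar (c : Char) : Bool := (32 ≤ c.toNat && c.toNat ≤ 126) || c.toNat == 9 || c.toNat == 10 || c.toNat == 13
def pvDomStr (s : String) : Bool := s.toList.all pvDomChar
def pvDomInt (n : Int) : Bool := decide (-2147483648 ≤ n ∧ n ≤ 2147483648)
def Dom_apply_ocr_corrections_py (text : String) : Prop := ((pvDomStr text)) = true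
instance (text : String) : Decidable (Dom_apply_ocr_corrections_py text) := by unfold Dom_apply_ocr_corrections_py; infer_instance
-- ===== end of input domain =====

-- B does one pass over the characters instead of A's 11 full-string replace passes; same corrections table, same result.

-- ===== PORT A =====
-- the corrections dict in insertion order (items() iteration order)
def ocrCorrections : List (String × String) :=
  [("O", "0"), ("o", "0"), ("I", "1"), ("l", "1"), ("Z", "2"), ("S", "5"), ("B", "8"),
   (".", ""), (",", ""), (" ", ""), ("|", "1")]

def apply_ocr_corrections_py (text : String) : String :=
  ocrCorrections.foldl (fun corrected p => PySem.Str.replace corrected p.1 p.2) text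

-- ===== PORT B =====
-- corrections.get(ch, ch) from Source B, same dict, keys checked in dict order
def ocrFix (c : Char) : String :=
  if c = 'O' then "0"
  else if c = 'o' then "0"
  else if c = 'I' then "1"
  else if c = 'l' then "1"
  else if c = 'Z' then "2"
  else if c = 'S' then "5"
  else if c = 'B' then "8"
  else if c = '.' then ""
  else if c = ',' then ""
  else if c = ' ' then ""
  else if c = '|' then "1"
  else String.singleton c

def apply_ocr_corrections_py_alt (text : String) : String :=
  PySem.Str.join "" (text.toList.foldl (fun pieces ch => pieces ++ [ocrFix ch]) [])

-- ===== PRECONDITION & SPEC =====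
def Spec_apply_ocr_corrections_py (text : String) (out : String) : Prop := out = apply_ocr_corrections_py_alt text
instance (text : String) (out : String) : Decidable (Spec_apply_ocr_corrections_py text out) := by unfold Spec_apply_ocr_corrections_py; infer_instance

-- ===== CLAIM (what is proved, stated in full; the proofs are below) =====
def Claim_equal_apply_ocr_corrections_py : Prop := ∀ (text : String), Dom_apply_ocr_corrections_py text → Spec_apply_ocr_corrections_py text (apply_ocr_corrections_py text)

-- ===== LEMMAS AND PROOFS =====

-- single-character replace is a per-character flatMap
theorem replace_go_single (c : Char) (r : List Char) :
    ∀ (l acc : List Char) (fuel : Nat), l.length ≤ fuel →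
      PySem.Chars.replace.go [c] r fuel l acc
        = acc.reverse ++ l.flatMap (fun x => if x = c then r else [x]) := by
  intro l
  induction l with
  | nil =>
      intro acc fuel _
      cases fuel <;> simp [PySem.Chars.replace.go]
  | cons x t ih =>
      intro acc fuel hf
      cases fuel with
      | zero => simp at hf
      | succ fuel =>
        have ht : t.length ≤ fuel := by simpa using hf
        by_cases hx : x = c
        · subst hx
          simp [PySem.Chars.replace.go, List.isPrefixOf, ih _ _ ht]
        · have : ([c].isPrefixOf (x :: t)) = false := by
            simp [List.isPrefixOf]; exact fun h => (hx h.symm).elim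
          simp [PySem.Chars.replace.go, this, ih _ _ ht, hx]

theorem replace_single (c : Char) (r l : List Char) :
    PySem.Chars.replace l [c] r = l.flatMap (fun x => if x = c then r else [x]) := by
  simpa using replace_go_single c r l [] l.length le_rfl

theorem foldl_pieces (l : List Char) (acc : List String) :
    l.foldl (fun pieces ch => pieces ++ [ocrFix ch]) acc = acc ++ l.map ocrFix := by
  induction l generalizing acc with
  | nil => simp
  | cons x t ih => simp [List.foldl_cons, ih]

theorem join_empty (parts : List (List Char)) :
    PySem.Chars.join [] parts = parts.flatten := by
  simp [PySem.Chars.join, List.intercalate]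
  induction parts with
  | nil => rfl
  | cons p t ih => cases t <;> simp_all [List.intersperse]

-- the composition of the eleven per-character substitutions, applied to one character
set_option maxHeartbeats 800000 in
theorem chain_char (c : Char) :
    (((((((((((((((((((((if c = 'O' then "0".toList else [c])).flatMap (fun x => if x = 'o' then "0".toList else [x]))).flatMap (fun x => if x = 'I' then "1".toList else [x]))).flatMap (fun x => if x = 'l' then "1".toList else [x]))).flatMap (fun x => if x = 'Z' then "2".toList else [x]))).flatMap (fun x => if x = 'S' then "5".toList else [x]))).flatMap (fun x => if x = 'B' then "8".toList else [x]))).flatMap (fun x => if x = '.' then "".toList else [x]))).flatMap (fun x => if x = ',' then "".toList else [x]))).flatMap (fun x => if x = ' ' then "".toList else [x]))).flatMap (fun x => if x = '|' then "1".toList else [x]))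
      = (ocrFix c).toList := by
  by_cases h1 : c = 'O'; · subst h1; decide
  by_cases h2 : c = 'o'; · subst h2; decide
  by_cases h3 : c = 'I'; · subst h3; decide
  by_cases h4 : c = 'l'; · subst h4; decide
  by_cases h5 : c = 'Z'; · subst h5; decide
  by_cases h6 : c = 'S'; · subst h6; decide
  by_cases h7 : c = 'B'; · subst h7; decide
  by_cases h8 : c = '.'; · subst h8; decide
  by_cases h9 : c = ','; · subst h9; decide
  by_cases h10 : c = ' '; · subst h10; decide
  by_cases h11 : c = '|'; · subst h11; decide
  simp [ocrFix, h1, h2, h3, h4, h5, h6, h7, h8, h9, h10, h11, String.singleton]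

-- the eleven substitution passes over a whole list collapse to one per-character pass
theorem chain_list (l : List Char) :
    ((((((((((((((((((((((l).flatMap (fun x => if x = 'O' then "0".toList else [x]))).flatMap (fun x => if x = 'o' then "0".toList else [x]))).flatMap (fun x => if x = 'I' then "1".toList else [x]))).flatMap (fun x => if x = 'l' then "1".toList else [x]))).flatMap (fun x => if x = 'Z' then "2".toList else [x]))).flatMap (fun x => if x = 'S' then "5".toList else [x]))).flatMap (fun x => if x = 'B' then "8".toList else [x]))).flatMap (fun x => if x = '.' then "".toList else [x]))).flatMap (fun x => if x = ',' then "".toList else [x]))).flatMap (fun x => if x = ' ' then "".toList else [x]))).flatMap (fun x => if x = '|' then "1".toList else [x]))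
      = l.flatMap (fun c => (ocrFix c).toList) := by
  induction l with
  | nil => rfl
  | cons x t ih =>
      simp only [List.flatMap_cons, List.flatMap_append, ih, chain_char]

theorem ports_agree (text : String) :
    apply_ocr_corrections_py text = apply_ocr_corrections_py_alt text := by
  have hB : (apply_ocr_corrections_py_alt text).toList
      = text.toList.flatMap (fun c => (ocrFix c).toList) := by
    simp only [apply_ocr_corrections_py_alt, foldl_pieces, PySem.Str.toList_join]
    simp [join_empty, List.flatten_eq_flatMap, List.flatMap_map]
  have hA : (apply_ocr_corrections_py text).toList
      = text.toList.flatMap (fun c => (ocrFix c).toList) := by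
    simp only [apply_ocr_corrections_py, ocrCorrections, List.foldl_cons, List.foldl_nil,
      PySem.Str.replace, String.toList_ofList]
    simp only [show ("O".toList) = ['O'] from rfl, show ("o".toList) = ['o'] from rfl,
      show ("I".toList) = ['I'] from rfl, show ("l".toList) = ['l'] from rfl,
      show ("Z".toList) = ['Z'] from rfl, show ("S".toList) = ['S'] from rfl,
      show ("B".toList) = ['B'] from rfl, show (".".toList) = ['.'] from rfl,
      show (",".toList) = [','] from rfl, show (" ".toList) = [' '] from rfl,
      show ("|".toList) = ['|'] from rfl]
    rw [replace_single, replace_single, replace_single, replace_single, replace_single,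
      replace_single, replace_single, replace_single, replace_single, replace_single,
      replace_single]
    exact chain_list text.toList
  calc apply_ocr_corrections_py text
      = String.ofList (apply_ocr_corrections_py text).toList := by rw [String.ofList_toList]
    _ = String.ofList (apply_ocr_corrections_py_alt text).toList := by rw [hA, hB]
    _ = apply_ocr_corrections_py_alt text := by rw [String.ofList_toList]

-- ===== VERDICT (by name: the statement is the Claim_ definition above) =====
theorem apply_ocr_corrections_py_spec : Claim_equal_apply_ocr_corrections_py := by
  intro text _
  exact ports_agree text
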